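-- pv_equiv track=rewrite | github.com/ids-infotech/corsearch_project | Saint_Vincent_final_structuring.py | extract_text_between_keywords
-- ===== SOURCE A (Python) =====
-- def extract_text_between_keywords(json_data):
--     extracted_text = []
--     current_applicant_data = []
--
--     for item in json_data['trademark']:
--         for line in item:
--             if 'Applicant' in line:
--                 if current_applicant_data:
--                     extracted_text.append(current_applicant_data[:])  # Append a copy of the current data
--                     current_applicant_data = []
--             current_applicant_data.append(line)
--
--     # Append the last applicant data
--     if current_applicant_data:
--         extracted_text.append(current_applicant_data[:])  # Append a copy of the last data
--
--     return extracted_text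
-- ===== SOURCE B (Python) =====
-- def extract_text_between_keywords(json_data):
--     # Index-jumping scan: flatten once, then repeatedly find the next 'Applicant'
--     # boundary and emit the slice between consecutive boundaries.
--     flat = [line for item in json_data['trademark'] for line in item]
--     n = len(flat)
--     result = []
--     s = 0
--     while s < n:
--         e = s + 1
--         while e < n and 'Applicant' not in flat[e]:
--             e += 1
--         result.append(flat[s:e])
--         s = e
--     return result
-- ===== Notes on version B (the rewrite author's own statement) =====
-- stated objective: alternative
-- what changed: Replaces A's single accumulate-and-flush-on-marker pass with state lists by a flatten followed by an index-jumping scan that locates the next 'Applicant' boundary and emits each segment as a slice flat[s:e].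
import Mathlib
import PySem

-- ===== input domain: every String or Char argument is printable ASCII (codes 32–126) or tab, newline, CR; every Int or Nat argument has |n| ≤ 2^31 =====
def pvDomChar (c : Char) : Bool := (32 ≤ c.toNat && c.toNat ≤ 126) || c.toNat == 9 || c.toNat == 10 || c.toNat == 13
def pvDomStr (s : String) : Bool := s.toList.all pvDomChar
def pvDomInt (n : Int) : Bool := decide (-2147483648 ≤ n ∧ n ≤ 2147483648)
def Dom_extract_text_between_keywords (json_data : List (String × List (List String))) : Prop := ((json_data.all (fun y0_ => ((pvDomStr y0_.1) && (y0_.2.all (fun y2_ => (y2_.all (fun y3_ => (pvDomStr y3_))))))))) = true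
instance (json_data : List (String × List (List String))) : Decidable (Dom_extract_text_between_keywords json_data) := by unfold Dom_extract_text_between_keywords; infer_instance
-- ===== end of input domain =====

-- B replaces A's accumulate-and-flush-on-marker pass by a flatten plus an index-jumping
-- scan that finds each next 'Applicant' boundary and emits slices (objective: alternative).

-- 'Applicant' in line (shared literal test of both Pythons)
def appB (line : String) : Bool := PySem.Str.isIn "Applicant" line

-- ===== PORT A =====
-- state = (extracted_text, current_applicant_data); one step of the inner 'for line in item' body
def stepA (st : List (List String) × List String) (line : String) : List (List String) × List String :=
  let st' :=
    if appB line then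
      if st.2 ≠ [] then (st.1 ++ [st.2], ([] : List String)) else st
    else st
  (st'.1, st'.2 ++ [line])

def extract_text_between_keywords (json_data : List (String × List (List String))) : List (List String) :=
  match (PySem.Dict.mk json_data).get? "trademark" with
  | none => []  -- KeyError in Python; excluded by Pre_
  | some items =>
    let st := items.foldl (fun st item => item.foldl stepA st) ([], [])
    st.1 ++ (if st.2 ≠ [] then [st.2] else [])

-- ===== PORT B =====
-- inner while: advance e while e < n and 'Applicant' not in flat[e]
-- (fuel makes the index loop structural; it is always called with enough fuel)
def nextB (flat : List String) : Nat → Nat → Nat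
  | 0, e => e
  | fuel + 1, e =>
    if h : e < flat.length then
      if appB flat[e] then e else nextB flat fuel (e + 1)
    else e

-- outer while: emit flat[s:e] and jump s to e
def segsB (flat : List String) : Nat → Nat → List (List String)
  | 0, _ => []
  | fuel + 1, s =>
    if _h : s < flat.length then
      let e := nextB flat (flat.length - (s + 1)) (s + 1)
      PySem.List.slice flat (some (s : Int)) (some (e : Int)) :: segsB flat fuel e
    else []

def extract_text_between_keywords_alt (json_data : List (String × List (List String))) : List (List String) :=
  match (PySem.Dict.mk json_data).get? "trademark" with
  | none => []  -- KeyError in Python; excluded by Pre_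
  | some items =>
    let flat := items.flatMap (fun item => item)
    segsB flat flat.length 0

-- ===== PRECONDITION & SPEC =====
-- Pre_ excludes exactly the inputs without a 'trademark' key, on which Python A raises KeyError.
def Pre_extract_text_between_keywords (json_data : List (String × List (List String))) : Prop :=
  "trademark" ∈ json_data.map Prod.fst
instance (json_data : List (String × List (List String))) : Decidable (Pre_extract_text_between_keywords json_data) := by unfold Pre_extract_text_between_keywords; infer_instance

def pvWitness_extract_text_between_keywords : (List (String × List (List String))) :=
  [("trademark", [["Applicant: A", "addr"], ["foo", "Applicant: B"]])]

def Spec_extract_text_between_keywords (json_data : List (String × List (List String))) (out : List (List String)) : Prop := out = extract_text_between_keywords_alt json_data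
instance (json_data : List (String × List (List String))) (out : List (List String)) : Decidable (Spec_extract_text_between_keywords json_data out) := by unfold Spec_extract_text_between_keywords; infer_instance

-- ===== CLAIM (what is proved, stated in full; the proofs are below) =====
def Claim_equal_extract_text_between_keywords : Prop := ∀ (json_data : List (String × List (List String))), Dom_extract_text_between_keywords json_data → Pre_extract_text_between_keywords json_data → Spec_extract_text_between_keywords json_data (extract_text_between_keywords json_data)

-- ===== LEMMAS AND PROOFS =====

-- common reference: split the flat line list into segments starting at index 0 and at each 'Applicant' line
def notApp (line : String) : Bool := !(appB line)

def splitApp : List String → List (List String)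
  | [] => []
  | x :: xs => (x :: xs.takeWhile notApp) :: splitApp (xs.dropWhile notApp)
termination_by xs => xs.length
decreasing_by
  simpa using Nat.lt_succ_of_le (List.length_dropWhile_le notApp xs)

theorem foldA_invariant (rest : List String) : ∀ (ext : List (List String)) (cur : List String),
    cur ≠ [] →
    ((rest.foldl stepA (ext, cur)).1 ++
      (if (rest.foldl stepA (ext, cur)).2 ≠ [] then [(rest.foldl stepA (ext, cur)).2] else [])) =
      ext ++ (cur ++ rest.takeWhile notApp) :: splitApp (rest.dropWhile notApp) := by
  induction rest with
  | nil => intro ext cur h; simp [splitApp, h]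
  | cons r rs ih =>
    intro ext cur h
    by_cases hr : appB r = true
    · have hstep : stepA (ext, cur) r = (ext ++ [cur], [r]) := by
        simp only [stepA, hr, if_pos, h, ne_eq, not_false_eq_true, List.nil_append]
      rw [List.foldl_cons, hstep, ih (ext ++ [cur]) [r] (by simp),
        List.takeWhile_cons, List.dropWhile_cons]
      simp only [notApp, hr, Bool.not_true, Bool.false_eq_true, if_false]
      rw [splitApp]
      simp
    · have hstep : stepA (ext, cur) r = (ext, cur ++ [r]) := by
        simp only [stepA, hr, Bool.false_eq_true, if_false]
      rw [List.foldl_cons, hstep, ih ext (cur ++ [r]) (by simp),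
        List.takeWhile_cons, List.dropWhile_cons]
      simp [notApp, hr]

theorem A_eq_splitApp (flat : List String) :
    ((flat.foldl stepA ([], [])).1 ++
      (if (flat.foldl stepA ([], [])).2 ≠ [] then [(flat.foldl stepA ([], [])).2] else [])) =
      splitApp flat := by
  cases flat with
  | nil => simp [splitApp]
  | cons x xs =>
    have hstep : stepA ([], []) x = ([], [x]) := by
      simp [stepA]
    rw [List.foldl_cons, hstep, foldA_invariant xs [] [x] (by simp), splitApp]
    simp

-- the inner while lands at e + (length of the notApp-prefix of flat.drop e)
theorem nextB_ge (flat : List String) (fuel e : Nat) : e ≤ nextB flat fuel e := by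
  induction fuel generalizing e with
  | zero => exact le_refl _
  | succ fuel ih =>
    unfold nextB
    split
    · split
      · exact le_refl _
      · exact Nat.le_trans (Nat.le_succ e) (ih (e + 1))
    · exact le_refl _

theorem nextB_eq (flat : List String) (fuel e : Nat) (hf : flat.length ≤ e + fuel) :
    nextB flat fuel e = e + ((flat.drop e).takeWhile notApp).length := by
  induction fuel generalizing e with
  | zero =>
    rw [List.drop_eq_nil_of_le (by omega)]
    simp [nextB]
  | succ fuel ih =>
    unfold nextB
    by_cases h : e < flat.length
    · rw [dif_pos h]
      have hdrop : flat.drop e = flat[e] :: flat.drop (e + 1) :=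
        List.drop_eq_getElem_cons h
      by_cases ha : appB flat[e] = true
      · rw [if_pos ha, hdrop, List.takeWhile_cons]
        simp [notApp, ha]
      · have hna : notApp flat[e] = true := by simp [notApp, ha]
        rw [if_neg ha, ih (e + 1) (by omega), hdrop, List.takeWhile_cons, if_pos hna,
          List.length_cons]
        omega
    · rw [dif_neg h, List.drop_eq_nil_of_le (Nat.le_of_not_lt h)]
      simp

-- take (takeWhile p l).length l = takeWhile p l ; drop (takeWhile p l).length l = dropWhile p l
theorem take_len_takeWhile {a : Type} (p : a -> Bool) (l : List a) :
    l.take (l.takeWhile p).length = l.takeWhile p := by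
  induction l with
  | nil => rfl
  | cons x xs ih =>
    rw [List.takeWhile_cons]
    by_cases h : p x = true
    · simp [h, ih]
    · simp [h]

theorem drop_len_takeWhile {a : Type} (p : a -> Bool) (l : List a) :
    l.drop (l.takeWhile p).length = l.dropWhile p := by
  induction l with
  | nil => rfl
  | cons x xs ih =>
    rw [List.takeWhile_cons, List.dropWhile_cons]
    by_cases h : p x = true
    · simp [h, ih]
    · simp [h]

theorem segsB_eq (flat : List String) (fuel s : Nat) (hf : flat.length ≤ s + fuel) :
    segsB flat fuel s = splitApp (flat.drop s) := by
  induction fuel generalizing s with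
  | zero =>
    rw [List.drop_eq_nil_of_le (by omega)]
    simp [segsB, splitApp]
  | succ fuel ih =>
    unfold segsB
    by_cases h : s < flat.length
    · rw [dif_pos h]
      show PySem.List.slice flat (some (s : Int))
            (some ((nextB flat (flat.length - (s + 1)) (s + 1)) : Int)) ::
          segsB flat fuel (nextB flat (flat.length - (s + 1)) (s + 1)) = splitApp (flat.drop s)
      set e := nextB flat (flat.length - (s + 1)) (s + 1) with he
      have hdrop : flat.drop s = flat[s] :: flat.drop (s + 1) :=
        List.drop_eq_getElem_cons h
      have heq : e = (s + 1) + ((flat.drop (s + 1)).takeWhile notApp).length := by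
        rw [he]; exact nextB_eq flat (flat.length - (s + 1)) (s + 1) (by omega)
      have hge : s + 1 ≤ e := nextB_ge flat (flat.length - (s + 1)) (s + 1)
      have hslice : PySem.List.slice flat (some (s : Int)) (some (e : Int)) =
          (flat.drop s).take (e - s) :=
        PySem.List.slice_natCast flat s e
      have htake : (flat.drop s).take (e - s) =
          flat[s] :: (flat.drop (s + 1)).takeWhile notApp := by
        rw [hdrop]
        have hes : e - s = ((flat.drop (s + 1)).takeWhile notApp).length + 1 := by
          omega
        rw [hes, List.take_succ_cons, take_len_takeWhile]
      have hdropE : flat.drop e = (flat.drop (s + 1)).dropWhile notApp := by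
        rw [heq, ← drop_len_takeWhile notApp (flat.drop (s + 1)), List.drop_drop]
      rw [hslice, htake, ih e (by omega), hdropE, hdrop, splitApp]
    · rw [dif_neg h, List.drop_eq_nil_of_le (Nat.le_of_not_lt h), splitApp]

-- ===== VERDICT (by name: the statement is the Claim_ definition above) =====
theorem extract_text_between_keywords_spec : Claim_equal_extract_text_between_keywords := by
  intro json_data _ _
  unfold Spec_extract_text_between_keywords extract_text_between_keywords extract_text_between_keywords_alt
  cases hget : (PySem.Dict.mk json_data).get? "trademark" with
  | none => rfl
  | some items =>
    simp only []
    have hflat : items.flatMap (fun item => item) = items.flatten := by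
      simp [List.flatMap]
    rw [← List.foldl_flatten, hflat, segsB_eq _ _ _ (by omega), List.drop_zero]
    exact A_eq_splitApp items.flatten
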